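-- pv_equiv track=rewrite | github.com/Nghia03092004/nghia03092004.github.io | project_euler_unified/problem_814/solution.py | derangements_mod
-- ===== SOURCE A (Python) =====
-- def derangements_mod(n, mod):
--     """Compute D_n mod p."""
--     if n == 0: return 1
--     if n == 1: return 0
--     prev2, prev1 = 1, 0
--     for i in range(2, n + 1):
--         curr = (i - 1) * (prev1 + prev2) % mod
--         prev2, prev1 = prev1, curr
--     return prev1
-- ===== SOURCE B (Python) =====
-- def derangements_mod(n, mod):
--     """Compute D_n mod p via the alternating factorial sum D_n = sum_{j=0}^n (-1)^j * n!/j!."""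
--     if n == 0: return 1
--     if n == 1: return 0
--     s = 0
--     p = 1                             # falling product n*(n-1)*...*(n-k+1) (mod)
--     sign = 1 if n % 2 == 0 else -1    # (-1)^(n-k)
--     for k in range(0, n + 1):
--         s = (s + sign * p) % mod
--         p = p * (n - k) % mod
--         sign = -sign
--     return s
-- ===== Notes on version B (the rewrite author's own statement) =====
-- stated objective: alternative
-- what changed: Replaces the two-term recurrence D_i=(i-1)(D_{i-1}+D_{i-2}) with the closed alternating factorial sum D_n = sum_{j=0}^n (-1)^j * n!/j!, accumulated in one pass via a running falling product and an alternating sign.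
import Mathlib
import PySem

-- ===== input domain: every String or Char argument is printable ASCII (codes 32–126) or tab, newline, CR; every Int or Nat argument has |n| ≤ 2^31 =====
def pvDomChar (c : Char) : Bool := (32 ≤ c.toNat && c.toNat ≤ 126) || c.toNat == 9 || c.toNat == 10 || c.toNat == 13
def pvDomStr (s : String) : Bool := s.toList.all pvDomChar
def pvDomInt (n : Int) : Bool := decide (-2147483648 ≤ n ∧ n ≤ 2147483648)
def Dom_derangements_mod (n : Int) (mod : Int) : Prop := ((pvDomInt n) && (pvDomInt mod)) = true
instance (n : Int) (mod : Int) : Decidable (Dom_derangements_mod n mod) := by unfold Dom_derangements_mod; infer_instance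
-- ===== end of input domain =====

-- B replaces A's two-term recurrence with the alternating factorial sum
-- D_n = sum_{j=0}^n (-1)^j * n!/j!, accumulated with a running falling product and sign.

-- ===== PORT A =====
def derangements_mod (n : Int) (mod : Int) : Int :=
  if n = 0 then 1
  else if n = 1 then 0
  else
    ((PySem.List.pyRange 2 (n + 1) 1).foldl
      (fun (p : Int × Int) i => (p.2, PySem.Int.mod ((i - 1) * (p.2 + p.1)) mod))
      (1, 0)).2

-- ===== PORT B =====
def derangements_mod_alt (n : Int) (mod : Int) : Int :=
  if n = 0 then 1
  else if n = 1 then 0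
  else
    ((PySem.List.pyRange 0 (n + 1) 1).foldl
      (fun (st : Int × Int × Int) k =>
        (PySem.Int.mod (st.1 + st.2.2 * st.2.1) mod,
         PySem.Int.mod (st.2.1 * (n - k)) mod,
         -st.2.2))
      (0, 1, if PySem.Int.mod n 2 = 0 then 1 else -1)).1

-- ===== PRECONDITION & SPEC =====
-- Python A raises ZeroDivisionError when mod = 0 and the loop runs (n ≥ 2); excluded.
def Pre_derangements_mod (n : Int) (mod : Int) : Prop := n < 2 ∨ mod ≠ 0
instance (n : Int) (mod : Int) : Decidable (Pre_derangements_mod n mod) := by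
  unfold Pre_derangements_mod; infer_instance

def pvWitness_derangements_mod : Int × Int := (6, 10)

def Spec_derangements_mod (n : Int) (mod : Int) (out : Int) : Prop := out = derangements_mod_alt n mod
instance (n : Int) (mod : Int) (out : Int) : Decidable (Spec_derangements_mod n mod out) := by
  unfold Spec_derangements_mod; infer_instance

-- ===== CLAIM (what is proved, stated in full; the proofs are below) =====
def Claim_equal_derangements_mod : Prop := ∀ (n : Int) (mod : Int), Dom_derangements_mod n mod → Pre_derangements_mod n mod → Spec_derangements_mod n mod (derangements_mod n mod)

-- ===== LEMMAS AND PROOFS =====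

-- exact derangement numbers
def Dex : Nat → Int
  | 0 => 1
  | 1 => 0
  | (k + 2) => ((k : Int) + 1) * (Dex (k + 1) + Dex k)

-- the one-term recurrence for derangements
theorem Dex_one_term : ∀ k : Nat,
    Dex (k + 1) = ((k : Int) + 1) * Dex k + (if (k + 1) % 2 = 0 then 1 else -1) := by
  intro k
  induction k with
  | zero => simp [Dex]
  | succ k ih =>
    have h2 : Dex (k + 2) = ((k : Int) + 1) * (Dex (k + 1) + Dex k) := rfl
    have hs : ((if (k + 2) % 2 = 0 then (1:Int) else -1))
        = -(if (k + 1) % 2 = 0 then (1:Int) else -1) := by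
      rcases Nat.mod_two_eq_zero_or_one k with h | h
      · have h1 : (k + 2) % 2 = 0 := by omega
        have h0 : (k + 1) % 2 ≠ 0 := by omega
        simp only [if_pos h1, if_neg h0]
        norm_num
      · have h1 : (k + 2) % 2 ≠ 0 := by omega
        have h0 : (k + 1) % 2 = 0 := by omega
        simp only [if_neg h1, if_pos h0]
    rw [h2, hs]
    have : ((k : Int) + 1) * Dex k = Dex (k + 1) - (if (k + 1) % 2 = 0 then 1 else -1) := by
      rw [ih]; ring
    push_cast
    nlinarith [this]

-- (-1)^j as an Int
def signInt (j : Nat) : Int := if j % 2 = 0 then 1 else -1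

-- falling product n*(n-1)*...*(n-k+1)
def ffall (n : Nat) : Nat → Int
  | 0 => 1
  | (k + 1) => ffall n k * ((n : Int) - (k : Int))

-- partial sums of the alternating factorial series (k-th term: (-1)^(n-k) * n!/(n-k)!)
def psum (n : Nat) : Nat → Int
  | 0 => 0
  | (t + 1) => psum n t + signInt (n + t) * ffall n t

theorem signInt_succ (j : Nat) : signInt (j + 1) = -signInt j := by
  unfold signInt
  rcases Nat.mod_two_eq_zero_or_one j with h | h
  · have h1 : (j + 1) % 2 = 1 := by omega
    rw [h, h1]; norm_num
  · have h1 : (j + 1) % 2 = 0 := by omega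
    rw [h, h1]; norm_num

theorem signInt_add_two (j : Nat) : signInt (j + 2) = signInt j := by
  rw [show j + 2 = (j + 1) + 1 from rfl, signInt_succ, signInt_succ, neg_neg]

theorem ffall_shift (n : Nat) : ∀ k : Nat, ffall (n + 1) (k + 1) = ((n : Int) + 1) * ffall n k := by
  intro k
  induction k with
  | zero => simp [ffall]
  | succ k ih =>
    have h1 : ffall (n + 1) (k + 2) = ffall (n + 1) (k + 1) * (((n : Int) + 1) - ((k : Int) + 1)) := by
      show ffall (n + 1) (k + 1) * (((n + 1 : Nat) : Int) - ((k + 1 : Nat) : Int)) = _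
      push_cast; ring
    have h2 : ffall n (k + 1) = ffall n k * ((n : Int) - (k : Int)) := rfl
    rw [h1, ih, h2]; ring

theorem psum_shift (n : Nat) : ∀ t : Nat,
    psum (n + 1) (t + 1) = signInt (n + 1) + ((n : Int) + 1) * psum n t := by
  intro t
  induction t with
  | zero => simp [psum, ffall]
  | succ t ih =>
    have h1 : psum (n + 1) (t + 2) = psum (n + 1) (t + 1) + signInt (n + 1 + (t + 1)) * ffall (n + 1) (t + 1) := rfl
    have h2 : psum n (t + 1) = psum n t + signInt (n + t) * ffall n t := rfl
    have hs : signInt (n + 1 + (t + 1)) = signInt (n + t) := by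
      rw [show n + 1 + (t + 1) = (n + t) + 2 by ring, signInt_add_two]
    rw [h1, ih, hs, ffall_shift, h2]; ring

theorem Dex_psum : ∀ n : Nat, Dex n = psum n (n + 1) := by
  intro n
  induction n with
  | zero => simp [Dex, psum, signInt, ffall]
  | succ n ih =>
    have h1 := Dex_one_term n
    have h2 := psum_shift n (n + 1)
    have hs : (if (n + 1) % 2 = 0 then (1:Int) else -1) = signInt (n + 1) := rfl
    rw [h2, ← ih, h1, hs]; ring

theorem fmod_mul_add (c x y m : Int) :
    (c * (Int.fmod x m + Int.fmod y m)).fmod m = (c * (x + y)).fmod m := by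
  conv_lhs => rw [Int.mul_fmod, Int.add_fmod, Int.fmod_fmod, Int.fmod_fmod]
  conv_rhs => rw [Int.mul_fmod, Int.add_fmod]

theorem fmod_add_sign (a s b m : Int) :
    (Int.fmod a m + s * Int.fmod b m).fmod m = (a + s * b).fmod m := by
  conv_lhs => rw [Int.add_fmod, Int.fmod_fmod, Int.mul_fmod, Int.fmod_fmod]
  conv_rhs => rw [Int.add_fmod, Int.mul_fmod]

theorem fmod_mul_right (b c m : Int) :
    (Int.fmod b m * c).fmod m = (b * c).fmod m := by
  conv_lhs => rw [Int.mul_fmod, Int.fmod_fmod]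
  conv_rhs => rw [Int.mul_fmod]

theorem pyRange_succ2 (t : Nat) :
    PySem.List.pyRange 2 ((t : Int) + 1 + 3) 1
      = PySem.List.pyRange 2 ((t : Int) + 3) 1 ++ [(t : Int) + 3] := by
  have h := PySem.List.pyRange_one_succ_right (a := 2) (b := (t : Int) + 3) (by omega)
  have e : (t : Int) + 1 + 3 = ((t : Int) + 3) + 1 := by ring
  rw [e]
  exact h

theorem loopA (m : Int) : ∀ t : Nat,
    (PySem.List.pyRange 2 ((t : Int) + 3) 1).foldl
      (fun (p : Int × Int) i => (p.2, PySem.Int.mod ((i - 1) * (p.2 + p.1)) m)) (1, 0)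
      = (Int.fmod (Dex (t + 1)) m, Int.fmod (Dex (t + 2)) m) := by
  intro t
  induction t with
  | zero =>
    have h : PySem.List.pyRange 2 3 1 = [2] := by decide
    have d1 : Dex 1 = 0 := rfl
    have d2 : Dex 2 = 1 := by decide
    simp only [Nat.cast_zero, zero_add]
    rw [h]
    simp [PySem.Int.mod, d1, d2, Int.zero_fmod]
  | succ t ih =>
    push_cast
    rw [pyRange_succ2, List.foldl_append, ih]
    simp only [List.foldl_cons, List.foldl_nil, PySem.Int.mod]
    rw [show t + 1 + 1 = t + 2 from rfl, show t + 1 + 2 = t + 3 from rfl]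
    refine congrArg₂ Prod.mk rfl ?_
    have he : ((t : Int) + 3 - 1) = ((t : Int) + 2) := by ring
    rw [he, fmod_mul_add]
    have hD : Dex (t + 3) = ((t : Int) + 2) * (Dex (t + 2) + Dex (t + 1)) := by
      have h3 : Dex ((t + 1) + 2) = (((t + 1 : Nat) : Int) + 1) * (Dex (t + 2) + Dex (t + 1)) := rfl
      rw [show t + 3 = (t + 1) + 2 from rfl, h3]; push_cast; ring
    rw [hD]

theorem loopB (m : Int) (u : Nat) : ∀ t : Nat,
    (PySem.List.pyRange 0 ((t : Int) + 1) 1).foldl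
      (fun (st : Int × Int × Int) k =>
        (PySem.Int.mod (st.1 + st.2.2 * st.2.1) m,
         PySem.Int.mod (st.2.1 * ((u : Int) - k)) m,
         -st.2.2))
      (0, 1, signInt u)
      = (Int.fmod (psum u (t + 1)) m, Int.fmod (ffall u (t + 1)) m, signInt (u + t + 1)) := by
  intro t
  induction t with
  | zero =>
    have h : PySem.List.pyRange 0 1 1 = [0] := by decide
    simp only [Nat.cast_zero, zero_add]
    rw [h]
    simp only [List.foldl_cons, List.foldl_nil, PySem.Int.mod]
    refine congrArg₂ Prod.mk ?_ (congrArg₂ Prod.mk ?_ ?_)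
    · show ((0 : Int) + signInt u * 1).fmod m = (psum u 1).fmod m
      simp [psum, ffall]
    · show ((1 : Int) * ((u : Int) - 0)).fmod m = (ffall u 1).fmod m
      simp [ffall]
    · exact (signInt_succ u).symm
  | succ t ih =>
    have hr : PySem.List.pyRange 0 ((t : Int) + 1 + 1) 1
        = PySem.List.pyRange 0 ((t : Int) + 1) 1 ++ [(t : Int) + 1] := by
      exact PySem.List.pyRange_one_succ_right (a := 0) (b := (t : Int) + 1) (by omega)
    push_cast
    rw [hr, List.foldl_append, ih]
    simp only [List.foldl_cons, List.foldl_nil, PySem.Int.mod]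
    refine congrArg₂ Prod.mk ?_ (congrArg₂ Prod.mk ?_ ?_)
    · have h2 : psum u (t + 2) = psum u (t + 1) + signInt (u + (t + 1)) * ffall u (t + 1) := rfl
      rw [fmod_add_sign, h2]
      rw [show u + (t + 1) = u + t + 1 from rfl]
    · have h2 : ffall u (t + 2) = ffall u (t + 1) * ((u : Int) - ((t : Int) + 1)) := by
        show ffall u (t + 1) * ((u : Int) - ((t + 1 : Nat) : Int)) = _
        push_cast; ring
      rw [fmod_mul_right, ← h2]
    · exact (signInt_succ (u + t + 1)).symm

-- ===== VERDICT (by name: the statement is the Claim_ definition above) =====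
theorem derangements_mod_spec : Claim_equal_derangements_mod := by
  intro n m _ _
  unfold Spec_derangements_mod derangements_mod derangements_mod_alt
  by_cases h0 : n = 0
  · simp [h0]
  by_cases h1 : n = 1
  · simp [h1]
  simp only [if_neg h0, if_neg h1]
  by_cases h2 : n < 2
  · have heA : PySem.List.pyRange 2 (n + 1) 1 = [] := by
      apply PySem.List.pyRange_one_eq_nil; omega
    rw [heA]
    by_cases h3 : n < 0
    · have heB : PySem.List.pyRange 0 (n + 1) 1 = [] := by
        apply PySem.List.pyRange_one_eq_nil; omega
      rw [heB]
      rfl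
    · omega
  · obtain ⟨u, hu, hu2⟩ : ∃ u : Nat, n = (u : Int) ∧ 2 ≤ u :=
      ⟨n.toNat, by omega, by omega⟩
    subst hu
    obtain ⟨t', ht'⟩ : ∃ t' : Nat, u = t' + 2 := ⟨u - 2, by omega⟩
    subst ht'
    have hsign : (if PySem.Int.mod ((t' + 2 : Nat) : Int) 2 = 0 then (1:Int) else -1)
        = signInt (t' + 2) := by
      unfold signInt
      have hm : PySem.Int.mod ((t' + 2 : Nat) : Int) 2 = (((t' + 2) % 2 : Nat) : Int) := by
        simp only [PySem.Int.mod]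
        rw [Int.fmod_eq_emod, if_pos (Or.inl (by norm_num : (0:Int) ≤ 2))]
        push_cast
        omega
      rw [hm]
      rcases Nat.mod_two_eq_zero_or_one (t' + 2) with h | h <;> rw [h] <;> norm_num
    have hB := loopB m (t' + 2) (t' + 2)
    have hbA : ((t' + 2 : Nat) : Int) + 1 = (t' : Int) + 3 := by push_cast; ring
    rw [hsign, hB, hbA, loopA, Dex_psum (t' + 2)]
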